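-- pv_equiv track=rewrite | github.com/coulontitouan/SAE-Base-de-donnees | extraire_donnees.py | remplacer_parametres
-- ===== SOURCE A (Python) =====
-- def remplacer_parametres(texte,parametres):
--     ind=0
--     res=''
--     for param in parametres:
--         ind_suiv=texte.find('?',ind)
--         if ind_suiv==-1:
--             return res+texte[ind:]
--         try:
--             _=float(param)
--             quote=""
--         except:
--             quote="'"
--
--         res+=texte[ind:ind_suiv]+quote+param+quote
--         ind=ind_suiv+1
--     return res+texte[ind:]
-- ===== SOURCE B (Python) =====
-- def _format(param):
--     try:
--         float(param)
--         return param
--     except Exception: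
--         return "'" + param + "'"
--
-- def remplacer_parametres(texte, parametres):
--     parts = texte.split('?')
--     params = list(parametres)
--     k = min(len(params), len(parts) - 1)
--     pieces = [parts[i] + _format(params[i]) for i in range(k)]
--     return ''.join(pieces) + '?'.join(parts[k:])
-- ===== Notes on version B (the rewrite author's own statement) =====
-- stated objective: simpler
-- what changed: B pre-splits the template on '?' once and joins the pieces with the formatted parameters (restoring the untouched tail with '?'.join), instead of A's cursor-and-find scan that repeatedly searches the template and slices substrings by index; the Lean ports also model the float-literal test by two different parsers (recursive-descent consumer for A, split-at-e/dot checker for B), proved equal.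
import Mathlib
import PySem

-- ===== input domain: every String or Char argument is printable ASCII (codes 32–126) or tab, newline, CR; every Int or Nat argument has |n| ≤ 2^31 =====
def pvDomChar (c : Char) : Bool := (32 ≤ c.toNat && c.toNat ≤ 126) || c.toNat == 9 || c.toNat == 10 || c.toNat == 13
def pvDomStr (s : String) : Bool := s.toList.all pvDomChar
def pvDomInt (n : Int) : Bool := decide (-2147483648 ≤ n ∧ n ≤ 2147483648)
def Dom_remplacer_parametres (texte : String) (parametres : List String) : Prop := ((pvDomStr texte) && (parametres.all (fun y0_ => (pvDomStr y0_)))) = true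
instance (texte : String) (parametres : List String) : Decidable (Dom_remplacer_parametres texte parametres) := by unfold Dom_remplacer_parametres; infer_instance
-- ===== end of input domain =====

-- B replaces A's cursor-and-find scan by a single split on '?' followed by joining the
-- pieces with the formatted parameters (objective: simpler decomposition, same cost).

-- ===== PORT A =====
-- A-side model of 'try: float(param)' — recursive-descent consumers following CPython's
-- float() literal grammar (sign, digit groups with single underscores between digits,
-- optional '.', optional exponent, inf/infinity/nan, surrounding whitespace); exact on
-- printable ASCII plus tab/newline/CR.
def pvIsDig (c : Char) : Bool := decide ('0' ≤ c ∧ c ≤ '9')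

-- consume further digits, allowing a single '_' between two digits
def pvDigRest : List Char → List Char
  | [] => []
  | c :: cs =>
    if pvIsDig c then pvDigRest cs
    else if c = '_' then
      match cs with
      | d :: cs' => if pvIsDig d then pvDigRest cs' else c :: cs
      | [] => c :: cs
    else c :: cs

-- a digit part must start with a digit; returns the unconsumed rest
def pvDigPart? : List Char → Option (List Char)
  | [] => none
  | c :: cs => if pvIsDig c then some (pvDigRest cs) else none

-- optional exponent, then end of string
def pvExpPart : List Char → Bool
  | [] => true
  | c :: cs =>
    if c = 'e' ∨ c = 'E' then
      let cs2 := match cs with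
        | [] => ([] : List Char)
        | s :: cs' => if s = '+' ∨ s = '-' then cs' else s :: cs'
      match pvDigPart? cs2 with
      | some r => r.isEmpty
      | none => false
    else false

def pvFloatBody (cs : List Char) : Bool :=
  match pvDigPart? cs with
  | some r =>
    match r with
    | '.' :: r2 =>
      (match pvDigPart? r2 with
       | some r3 => pvExpPart r3
       | none => pvExpPart r2)
    | _ => pvExpPart r
  | none =>
    match cs with
    | '.' :: r2 =>
      (match pvDigPart? r2 with
       | some r3 => pvExpPart r3
       | none => false)
    | _ => false

def pvFloatOk (cs0 : List Char) : Bool :=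
  let cs1 := PySem.Chars.strip cs0
  let cs := match cs1 with
    | [] => ([] : List Char)
    | c :: r => if c = '+' ∨ c = '-' then r else c :: r
  let low := PySem.Chars.lower cs
  if low = ['i','n','f'] ∨ low = ['i','n','f','i','n','i','t','y'] ∨ low = ['n','a','n'] then true
  else pvFloatBody cs

-- quote+param+quote with quote = "" if float(param) succeeds else "'"
def pvFmt (p : String) : List Char :=
  if pvFloatOk p.toList then p.toList else '\'' :: (p.toList ++ ['\''])

-- the loop: state (ind, res), texte.find('?', ind), slice, advance past the '?'
def pvALoop (t : List Char) : List String → Int → List Char → List Char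
  | [], ind, res => res ++ PySem.List.slice t (some ind) none
  | p :: ps, ind, res =>
    let ind_suiv := PySem.Chars.findFrom t ['?'] ind
    if ind_suiv = -1 then res ++ PySem.List.slice t (some ind) none
    else pvALoop t ps (ind_suiv + 1)
           (res ++ PySem.List.slice t (some ind) (some ind_suiv) ++ pvFmt p)

def remplacer_parametres (texte : String) (parametres : List String) : String :=
  String.ofList (pvALoop texte.toList parametres 0 [])

-- ===== PORT B =====
-- B-side model of 'try: float(param)' — a split-based checker: strip and drop the sign,
-- split the rest at the first 'e'/'E' into mantissa and exponent, split the mantissa at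
-- the first '.', and validate each piece as a digit group ((digit | '_' digit)+, i.e.
-- underscores only between digits); exact on printable ASCII plus tab/newline/CR.
def bTail : List Char → Bool
  | [] => true
  | c :: cs =>
    if c = '_' then
      match cs with
      | [] => false
      | d :: cs' => pvIsDig d && bTail cs'
    else pvIsDig c && bTail cs

def bGroup : List Char → Bool
  | [] => false
  | c :: cs => pvIsDig c && bTail cs

def bSign : List Char → List Char
  | [] => []
  | c :: r => if c = '+' ∨ c = '-' then r else c :: r

def bNotDot (c : Char) : Bool := c != '.'
def bNotExp (c : Char) : Bool := c != 'e' && c != 'E'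

def bMant (m : List Char) : Bool :=
  let a := m.takeWhile bNotDot
  match m.dropWhile bNotDot with
  | [] => bGroup a
  | _ :: b => (bGroup a || a.isEmpty) && (bGroup b || b.isEmpty) && !(a.isEmpty && b.isEmpty)

def bExp : List Char → Bool
  | [] => true
  | _ :: ex => bGroup (bSign ex)

def bBody (cs : List Char) : Bool :=
  bMant (cs.takeWhile bNotExp) && bExp (cs.dropWhile bNotExp)

def bFloatOk (cs0 : List Char) : Bool :=
  let cs := bSign (PySem.Chars.strip cs0)
  let low := PySem.Chars.lower cs
  low == ['i','n','f'] || low == ['i','n','f','i','n','i','t','y'] || low == ['n','a','n'] || bBody cs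

def bFmt (p : String) : List Char :=
  if bFloatOk p.toList then p.toList else '\'' :: (p.toList ++ ['\''])

-- parts = texte.split('?'); k = min(len(params), len(parts)-1);
-- pieces[i] = parts[i] + fmt(params[i]); result = ''.join(pieces) + '?'.join(parts[k:])
def remplacer_parametres_alt (texte : String) (parametres : List String) : String :=
  let parts := PySem.Chars.splitOn texte.toList ['?']
  let k := min parametres.length (parts.length - 1)
  let pieces := (List.range k).map (fun i => parts.getD i [] ++ bFmt (parametres.getD i ""))
  String.ofList (pieces.flatten ++ PySem.Chars.join ['?'] (parts.drop k))

-- ===== PRECONDITION & SPEC =====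
def Spec_remplacer_parametres (texte : String) (parametres : List String) (out : String) : Prop := out = remplacer_parametres_alt texte parametres
instance (texte : String) (parametres : List String) (out : String) : Decidable (Spec_remplacer_parametres texte parametres out) := by unfold Spec_remplacer_parametres; infer_instance

-- ===== CLAIM (what is proved, stated in full; the proofs are below) =====
def Claim_equal_remplacer_parametres : Prop := ∀ (texte : String) (parametres : List String), Dom_remplacer_parametres texte parametres → Spec_remplacer_parametres texte parametres (remplacer_parametres texte parametres)

-- ===== LEMMAS AND PROOFS =====

-- ---- Part 1: the two float models agree ----

-- where A's digit scan may stop: end, or a non-digit that is not '_'-followed-by-digit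
def bStop : List Char → Bool
  | [] => true
  | c :: t => !pvIsDig c && (c != '_' || (match t with | [] => true | d :: _ => !pvIsDig d))

-- manual unfolding equations
theorem digRest_cons_dig {c : Char} (cs : List Char) (h : pvIsDig c = true) :
    pvDigRest (c :: cs) = pvDigRest cs := by
  cases cs <;> simp [pvDigRest, h]

theorem digRest_under_dig {d : Char} (cs : List Char) (h : pvIsDig d = true) :
    pvDigRest ('_' :: d :: cs) = pvDigRest cs := by
  have h0 : pvIsDig '_' = false := by decide
  simp [pvDigRest, h0, h]

theorem digRest_under_nondig {d : Char} (cs : List Char) (h : pvIsDig d = false) :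
    pvDigRest ('_' :: d :: cs) = '_' :: d :: cs := by
  have h0 : pvIsDig '_' = false := by decide
  simp [pvDigRest, h0, h]

theorem digRest_under_nil : pvDigRest ['_'] = ['_'] := rfl

theorem digRest_other {c : Char} (cs : List Char) (h1 : pvIsDig c = false) (h2 : c ≠ '_') :
    pvDigRest (c :: cs) = c :: cs := by
  cases cs <;> simp [pvDigRest, h1, h2]

theorem bTail_under_nil : bTail ['_'] = false := rfl

theorem bTail_under_cons (d : Char) (cs : List Char) :
    bTail ('_' :: d :: cs) = (pvIsDig d && bTail cs) := rfl

theorem bTail_other {c : Char} (cs : List Char) (h : c ≠ '_') :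
    bTail (c :: cs) = (pvIsDig c && bTail cs) := by
  cases cs <;> simp [bTail, h]

theorem bStop_cons (c : Char) (t : List Char) :
    bStop (c :: t) = (!pvIsDig c && (c != '_' || (match t with | [] => true | d :: _ => !pvIsDig d))) := rfl

theorem bTail_chars {a : List Char} (h : bTail a = true) :
    ∀ c ∈ a, (pvIsDig c || c == '_') = true := by
  induction a using bTail.induct with
  | case1 => simp
  | case2 => rw [bTail_under_nil] at h; exact absurd h (by simp)
  | case3 d cs' ih =>
    rw [bTail_under_cons, Bool.and_eq_true] at h
    intro c hc
    simp only [List.mem_cons] at hc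
    rcases hc with rfl | rfl | hc
    · simp
    · simp [h.1]
    · exact ih h.2 c hc
  | case4 d cs' hne ih =>
    rw [bTail_other _ hne, Bool.and_eq_true] at h
    intro c hc
    simp only [List.mem_cons] at hc
    rcases hc with rfl | hc
    · simp [h.1]
    · exact ih h.2 c hc

theorem digRest_append {a : List Char} (t : List Char)
    (ha : bTail a = true) (ht : bStop t = true) : pvDigRest (a ++ t) = t := by
  induction a using bTail.induct with
  | case1 =>
    simp only [List.nil_append]
    cases t with
    | nil => rfl
    | cons c t' =>
      rw [bStop_cons] at ht
      simp only [Bool.and_eq_true, Bool.not_eq_eq_eq_not, Bool.not_true,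
        Bool.or_eq_true, bne_iff_ne] at ht
      by_cases hc : c = '_'
      · subst hc
        rcases ht.2 with hne | hnd
        · exact absurd rfl hne
        · cases t' with
          | nil => exact digRest_under_nil
          | cons d t'' =>
            simp only [Bool.not_eq_eq_eq_not, Bool.not_true] at hnd
            exact digRest_under_nondig _ hnd
      · exact digRest_other _ ht.1 hc
  | case2 => rw [bTail_under_nil] at ha; exact absurd ha (by simp)
  | case3 d cs' ih =>
    rw [bTail_under_cons, Bool.and_eq_true] at ha
    simp only [List.cons_append]
    rw [digRest_under_dig _ ha.1]
    exact ih ha.2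
  | case4 d cs' hne ih =>
    rw [bTail_other _ hne, Bool.and_eq_true] at ha
    simp only [List.cons_append]
    rw [digRest_cons_dig _ ha.1]
    exact ih ha.2

theorem bTail_append {a : List Char} (t : List Char)
    (ha : bTail a = true) (_ht : bStop t = true) : bTail (a ++ t) = bTail t := by
  induction a using bTail.induct with
  | case1 => simp
  | case2 => rw [bTail_under_nil] at ha; exact absurd ha (by simp)
  | case3 d cs' ih =>
    rw [bTail_under_cons, Bool.and_eq_true] at ha
    simp only [List.cons_append]
    rw [bTail_under_cons, ha.1, ih ha.2]
    simp
  | case4 d cs' hne ih =>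
    rw [bTail_other _ hne, Bool.and_eq_true] at ha
    simp only [List.cons_append]
    rw [bTail_other _ hne, ha.1, ih ha.2]
    simp

theorem bTail_stop {t : List Char} (ht : bStop t = true) (hne : t ≠ []) :
    bTail t = false := by
  cases t with
  | nil => exact absurd rfl hne
  | cons c t' =>
    rw [bStop_cons] at ht
    simp only [Bool.and_eq_true, Bool.not_eq_eq_eq_not, Bool.not_true,
      Bool.or_eq_true, bne_iff_ne] at ht
    by_cases hc : c = '_'
    · subst hc
      rcases ht.2 with h | h
      · exact absurd rfl h
      · cases t' with
        | nil => exact bTail_under_nil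
        | cons d t'' =>
          simp only [Bool.not_eq_eq_eq_not, Bool.not_true] at h
          rw [bTail_under_cons, h]
          rfl
    · rw [bTail_other _ hc, ht.1]
      rfl

theorem bGroup_cons (c : Char) (a : List Char) :
    bGroup (c :: a) = (pvIsDig c && bTail a) := rfl

theorem bGroup_ne_nil {g : List Char} (hg : bGroup g = true) : g ≠ [] := by
  cases g with
  | nil => exact absurd hg (by simp [bGroup])
  | cons c a => simp

theorem bGroup_append_stop {g t : List Char} (hg : bGroup g = true)
    (ht : bStop t = true) (hne : t ≠ []) : bGroup (g ++ t) = false := by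
  cases g with
  | nil => exact absurd hg (by simp [bGroup])
  | cons c a =>
    rw [bGroup_cons, Bool.and_eq_true] at hg
    simp only [List.cons_append, bGroup_cons]
    rw [bTail_append t hg.2 ht, bTail_stop ht hne]
    simp

theorem digRest_decompose (cs : List Char) :
    ∃ a, cs = a ++ pvDigRest cs ∧ bTail a = true ∧ bStop (pvDigRest cs) = true := by
  induction cs using pvDigRest.induct with
  | case1 => exact ⟨[], rfl, rfl, rfl⟩
  | case2 d cs' hdig ih =>
    obtain ⟨a, h1, h2, h3⟩ := ih
    rw [digRest_cons_dig _ hdig]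
    have hne : d ≠ '_' := by rintro rfl; exact absurd hdig (by decide)
    refine ⟨d :: a, ?_, ?_, h3⟩
    · rw [List.cons_append, ← h1]
    · rw [bTail_other _ hne, hdig, h2]; rfl
  | case3 d cs' hdig hnu ih =>
    obtain ⟨a, h1, h2, h3⟩ := ih
    rw [digRest_under_dig _ hdig]
    refine ⟨'_' :: d :: a, ?_, ?_, h3⟩
    · rw [List.cons_append, List.cons_append, ← h1]
    · rw [bTail_under_cons, hdig, h2]; rfl
  | case4 d cs' hnd hnu =>
    have hnd' : pvIsDig d = false := by simpa using hnd
    rw [digRest_under_nondig _ hnd']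
    exact ⟨[], rfl, rfl, by
      rw [bStop_cons]
      simp [show pvIsDig '_' = false from by decide, hnd']⟩
  | case5 hnu =>
    rw [digRest_under_nil]
    exact ⟨[], rfl, rfl, by decide⟩
  | case6 d cs' hnd hne =>
    have hnd' : pvIsDig d = false := by simpa using hnd
    rw [digRest_other _ hnd' hne]
    exact ⟨[], rfl, rfl, by
      rw [bStop_cons]
      simp [hnd', hne]⟩

theorem digPart_cons (c : Char) (cs : List Char) :
    pvDigPart? (c :: cs) = (if pvIsDig c then some (pvDigRest cs) else none) := rfl

theorem digPart_of_group {g t : List Char} (hg : bGroup g = true)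
    (ht : bStop t = true) : pvDigPart? (g ++ t) = some t := by
  cases g with
  | nil => exact absurd hg (by simp [bGroup])
  | cons c a =>
    rw [bGroup_cons, Bool.and_eq_true] at hg
    simp only [List.cons_append, digPart_cons]
    rw [if_pos hg.1, digRest_append t hg.2 ht]

theorem digPart_decompose {cs r : List Char} (h : pvDigPart? cs = some r) :
    ∃ g, cs = g ++ r ∧ bGroup g = true ∧ bStop r = true := by
  cases cs with
  | nil => exact absurd h (by simp [pvDigPart?])
  | cons c cs' =>
    rw [digPart_cons] at h
    by_cases hd : pvIsDig c = true
    · rw [if_pos hd] at h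
      obtain ⟨a, h1, h2, h3⟩ := digRest_decompose cs'
      injection h with h
      subst h
      refine ⟨c :: a, by rw [List.cons_append, ← h1], ?_, h3⟩
      rw [bGroup_cons, hd, h2]; rfl
    · rw [if_neg hd] at h; exact absurd h (by simp)

theorem group_iff_digPart_nil (g : List Char) :
    bGroup g = (pvDigPart? g == some []) := by
  by_cases hg : bGroup g = true
  · rw [hg]
    have := digPart_of_group (t := []) hg rfl
    simp only [List.append_nil] at this
    simp [this]
  · rw [Bool.not_eq_true] at hg
    rw [hg]
    by_cases h : pvDigPart? g = some []
    · obtain ⟨g', h1, h2, _⟩ := digPart_decompose h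
      simp only [List.append_nil] at h1
      subst h1
      rw [h2] at hg; exact absurd hg (by simp)
    · simp [h]

theorem digPart_all (cs2 : List Char) :
    (match pvDigPart? cs2 with
      | some r => r.isEmpty
      | none => false) = bGroup cs2 := by
  cases h : pvDigPart? cs2 with
  | none =>
    simp only
    by_cases hg : bGroup cs2 = true
    · rw [group_iff_digPart_nil, h] at hg; exact absurd hg (by simp)
    · simp only [Bool.not_eq_true] at hg; rw [hg]
  | some r =>
    simp only
    cases hr : r with
    | nil =>
      subst hr
      rw [group_iff_digPart_nil, h]
      simp
    | cons x xs =>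
      subst hr
      obtain ⟨g, h1, h2, h3⟩ := digPart_decompose h
      subst h1
      rw [bGroup_append_stop h2 h3 (by simp)]
      simp

theorem expPart_cons (c : Char) (cs : List Char) :
    pvExpPart (c :: cs) =
      (if c = 'e' ∨ c = 'E' then
        (match pvDigPart? (match cs with
          | [] => ([] : List Char)
          | s :: cs' => if s = '+' ∨ s = '-' then cs' else s :: cs') with
         | some r => r.isEmpty
         | none => false)
      else false) := rfl

theorem bSign_match (ex : List Char) :
    (match ex with
      | [] => ([] : List Char)
      | s :: cs' => if s = '+' ∨ s = '-' then cs' else s :: cs') = bSign ex := by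
  cases ex <;> rfl

theorem expPart_eq_bExp {t : List Char}
    (h : t = [] ∨ ∃ ex, t = 'e' :: ex ∨ t = 'E' :: ex) :
    pvExpPart t = bExp t := by
  rcases h with rfl | ⟨ex, h | h⟩
  · rfl
  · subst h
    rw [expPart_cons, if_pos (Or.inl rfl), bSign_match]
    exact digPart_all (bSign ex)
  · subst h
    rw [expPart_cons, if_pos (Or.inr rfl), bSign_match]
    exact digPart_all (bSign ex)

theorem expPart_false {c : Char} {t : List Char}
    (h : ¬(c = 'e' ∨ c = 'E')) : pvExpPart (c :: t) = false := by
  rw [expPart_cons, if_neg h]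

theorem good_pred {c : Char} (h : (pvIsDig c || c == '_') = true) :
    bNotDot c = true ∧ bNotExp c = true := by
  rcases Bool.or_eq_true _ _ |>.mp h with h | h
  · simp only [pvIsDig, decide_eq_true_eq] at h
    obtain ⟨h1, h2⟩ := h
    refine ⟨?_, ?_⟩
    · simp only [bNotDot, bne_iff_ne]
      rintro rfl; revert h1; decide
    · simp only [bNotExp, Bool.and_eq_true, bne_iff_ne]
      constructor <;> (rintro rfl; revert h2; decide)
  · simp only [beq_iff_eq] at h; subst h; exact ⟨rfl, rfl⟩

theorem tw_append {g t : List Char} {p : Char → Bool}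
    (h : ∀ c ∈ g, p c = true) : (g ++ t).takeWhile p = g ++ t.takeWhile p := by
  induction g with
  | nil => simp
  | cons c a ih =>
    simp only [List.cons_append, List.takeWhile_cons, h c (by simp)]
    rw [ih (fun x hx => h x (by simp [hx]))]
    simp

theorem dw_append {g t : List Char} {p : Char → Bool}
    (h : ∀ c ∈ g, p c = true) : (g ++ t).dropWhile p = t.dropWhile p := by
  induction g with
  | nil => simp
  | cons c a ih =>
    simp only [List.cons_append, List.dropWhile_cons, h c (by simp)]
    exact ih (fun x hx => h x (by simp [hx]))

theorem bStop_takeWhile {t : List Char} (p : Char → Bool) (ht : bStop t = true) :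
    bStop (t.takeWhile p) = true := by
  cases t with
  | nil => rfl
  | cons c t' =>
    rw [bStop_cons] at ht
    simp only [Bool.and_eq_true, Bool.not_eq_eq_eq_not, Bool.not_true,
      Bool.or_eq_true, bne_iff_ne] at ht
    rw [List.takeWhile_cons]
    by_cases hp : p c = true
    · rw [if_pos hp, bStop_cons]
      simp only [Bool.and_eq_true, Bool.not_eq_eq_eq_not, Bool.not_true,
        Bool.or_eq_true, bne_iff_ne, ht.1, true_and]
      rcases ht.2 with h | h
      · exact Or.inl h
      · right
        cases t' with
        | nil => simp
        | cons d t'' =>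
          simp only [Bool.not_eq_eq_eq_not, Bool.not_true] at h
          rw [List.takeWhile_cons]
          by_cases hpd : p d = true
          · simp [hpd, h]
          · simp [hpd]
    · rw [if_neg hp]; rfl

theorem group_chars {g : List Char} (hg : bGroup g = true) :
    ∀ c ∈ g, (pvIsDig c || c == '_') = true := by
  intro c hc
  cases g with
  | nil => simp at hc
  | cons x a =>
    rw [bGroup_cons, Bool.and_eq_true] at hg
    simp only [List.mem_cons] at hc
    rcases hc with rfl | hc
    · simp [hg.1]
    · exact bTail_chars hg.2 c hc

theorem mant_group {g : List Char} (hg : bGroup g = true) : bMant g = true := by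
  have hnd : ∀ c ∈ g, bNotDot c = true := fun c hc => (good_pred (group_chars hg c hc)).1
  have h1 : g.takeWhile bNotDot = g := by
    have := tw_append (t := []) hnd
    simpa using this
  have h2 : g.dropWhile bNotDot = [] := by
    have := dw_append (t := []) hnd
    simpa using this
  simp only [bMant, h1, h2, hg]

theorem mant_dot0 (b : List Char) :
    bMant ('.' :: b) = ((bGroup b || b.isEmpty) && !b.isEmpty) := by
  simp only [bMant, List.takeWhile_cons, List.dropWhile_cons,
    show bNotDot '.' = false from rfl]
  simp [bGroup]

theorem mant_gdot {g : List Char} (hg : bGroup g = true) (b : List Char) :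
    bMant (g ++ '.' :: b) = (bGroup b || b.isEmpty) := by
  have hnd : ∀ c ∈ g, bNotDot c = true := fun c hc => (good_pred (group_chars hg c hc)).1
  simp only [bMant, tw_append hnd, dw_append hnd, List.takeWhile_cons,
    List.dropWhile_cons, show bNotDot '.' = false from rfl]
  simp only [Bool.false_eq_true, if_false, List.append_nil]
  rw [hg]
  simp [bGroup_ne_nil hg]

theorem mant_reject {g x : List Char} (hg : bGroup g = true) (hx : bStop x = true)
    (c : Char) (x' : List Char) (hcx : x = c :: x') (hdotc : bNotDot c = true) :
    bMant (g ++ x) = false := by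
  have hnd : ∀ c ∈ g, bNotDot c = true := fun c hc => (good_pred (group_chars hg c hc)).1
  have hyne : x.takeWhile bNotDot ≠ [] := by
    subst hcx
    rw [List.takeWhile_cons, if_pos hdotc]
    simp
  have hgy : bGroup (g ++ x.takeWhile bNotDot) = false :=
    bGroup_append_stop hg (bStop_takeWhile bNotDot hx) hyne
  have hne : (g ++ x.takeWhile bNotDot).isEmpty = false := by
    simp [bGroup_ne_nil hg]
  simp only [bMant, tw_append hnd, dw_append hnd]
  cases hdw : x.dropWhile bNotDot with
  | nil => simpa [hdw] using hgy
  | cons y b => simp [hgy, hne]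

theorem mant_reject0 {c : Char} (x : List Char) (hc : pvIsDig c = false)
    (hdotc : bNotDot c = true) : bMant (c :: x) = false := by
  simp only [bMant, List.takeWhile_cons, List.dropWhile_cons, hdotc, if_pos]
  cases hdw : x.dropWhile bNotDot with
  | nil => simp [bGroup_cons, hc]
  | cons y b => simp [bGroup_cons, hc]

theorem group_tw_notexp {g : List Char} (hg : bGroup g = true) (t : List Char) :
    (g ++ t).takeWhile bNotExp = g ++ t.takeWhile bNotExp := by
  exact tw_append (fun x hx => (good_pred (group_chars hg x hx)).2)

theorem group_dw_notexp {g : List Char} (hg : bGroup g = true) (t : List Char) :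
    (g ++ t).dropWhile bNotExp = t.dropWhile bNotExp := by
  exact dw_append (fun x hx => (good_pred (group_chars hg x hx)).2)

theorem group_tw_reject {g x : List Char} (hg : bGroup g = true) (hx : bStop x = true)
    {c : Char} {x' : List Char} (hcx : x = c :: x') (hc : bNotExp c = true) :
    bGroup (g ++ x.takeWhile bNotExp) = false ∧
      (g ++ x.takeWhile bNotExp).isEmpty = false := by
  have hyne : x.takeWhile bNotExp ≠ [] := by
    subst hcx
    rw [List.takeWhile_cons, if_pos hc]
    simp
  exact ⟨bGroup_append_stop hg (bStop_takeWhile bNotExp hx) hyne,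
    by simp [bGroup_ne_nil hg]⟩

theorem body_eq (cs : List Char) : pvFloatBody cs = bBody cs := by
  cases h : pvDigPart? cs with
  | none =>
    have hshape : cs = [] ∨ ∃ c cs', cs = c :: cs' ∧ pvIsDig c = false := by
      cases cs with
      | nil => exact Or.inl rfl
      | cons c cs' =>
        right
        refine ⟨c, cs', rfl, ?_⟩
        rw [digPart_cons] at h
        by_cases hd : pvIsDig c = true
        · rw [if_pos hd] at h; exact absurd h (by simp)
        · simpa using hd
    rcases hshape with rfl | ⟨c, cs', rfl, hc⟩
    · decide
    · by_cases hdot : c = '.'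
      · subst hdot
        have htw : ('.' :: cs').takeWhile bNotExp = '.' :: cs'.takeWhile bNotExp := by
          rw [List.takeWhile_cons, if_pos (by decide : bNotExp '.' = true)]
        have hdw : ('.' :: cs').dropWhile bNotExp = cs'.dropWhile bNotExp := by
          rw [List.dropWhile_cons, if_pos (by decide : bNotExp '.' = true)]
        unfold bBody
        rw [htw, hdw, mant_dot0]
        cases h2 : pvDigPart? cs' with
        | some r3 =>
          have hA : pvFloatBody ('.' :: cs') = pvExpPart r3 := by
            simp only [pvFloatBody, h, h2]
          rw [hA]
          obtain ⟨g2, hces, hg2, hs3⟩ := digPart_decompose h2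
          subst hces
          rw [group_tw_notexp hg2, group_dw_notexp hg2]
          rcases hr3 : r3 with _ | ⟨h0, r3'⟩
          · subst hr3
            simp only [List.takeWhile_nil, List.dropWhile_nil, List.append_nil]
            rw [hg2]
            simp [List.isEmpty_eq_false_iff, bGroup_ne_nil hg2, pvExpPart, bExp]
          · subst hr3
            by_cases hexp : h0 = 'e' ∨ h0 = 'E'
            · have htw0 : (h0 :: r3').takeWhile bNotExp = [] := by
                rw [List.takeWhile_cons, if_neg (by rcases hexp with rfl | rfl <;> decide)]
              have hdw0 : (h0 :: r3').dropWhile bNotExp = h0 :: r3' := by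
                rw [List.dropWhile_cons, if_neg (by rcases hexp with rfl | rfl <;> decide)]
              rw [htw0, hdw0, List.append_nil, hg2]
              rw [expPart_eq_bExp (Or.inr ⟨r3', by rcases hexp with rfl | rfl <;> simp⟩)]
              simp [List.isEmpty_eq_false_iff, bGroup_ne_nil hg2]
            · have hcne : bNotExp h0 = true := by
                simp only [bNotExp, Bool.and_eq_true, bne_iff_ne]
                exact ⟨fun hh => hexp (Or.inl hh), fun hh => hexp (Or.inr hh)⟩
              obtain ⟨hrej1, hrej2⟩ := group_tw_reject hg2 hs3 rfl hcne
              rw [expPart_false hexp, hrej1, hrej2]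
              simp
        | none =>
          have hA : pvFloatBody ('.' :: cs') = false := by
            simp only [pvFloatBody, h, h2]
          rw [hA]
          have hsh : cs' = [] ∨ ∃ c2 cs'', cs' = c2 :: cs'' ∧ pvIsDig c2 = false := by
            cases cs' with
            | nil => exact Or.inl rfl
            | cons c2 cs'' =>
              right
              refine ⟨c2, cs'', rfl, ?_⟩
              rw [digPart_cons] at h2
              by_cases hd : pvIsDig c2 = true
              · rw [if_pos hd] at h2; exact absurd h2 (by simp)
              · simpa using hd
          rcases hsh with rfl | ⟨c2, cs'', rfl, hc2⟩
          · decide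
          · by_cases hexp : c2 = 'e' ∨ c2 = 'E'
            · have htw0 : (c2 :: cs'').takeWhile bNotExp = [] := by
                rw [List.takeWhile_cons, if_neg (by rcases hexp with rfl | rfl <;> decide)]
              rw [htw0]
              simp
            · have hcne : bNotExp c2 = true := by
                simp only [bNotExp, Bool.and_eq_true, bne_iff_ne]
                exact ⟨fun hh => hexp (Or.inl hh), fun hh => hexp (Or.inr hh)⟩
              have htw0 : (c2 :: cs'').takeWhile bNotExp = c2 :: cs''.takeWhile bNotExp := by
                rw [List.takeWhile_cons, if_pos hcne]
              rw [htw0]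
              rw [show bGroup (c2 :: cs''.takeWhile bNotExp) = false by
                rw [bGroup_cons, hc2]; rfl]
              simp
      · -- head is neither digit nor '.': A gives false, B's mantissa starts with a bad char
        have hA : pvFloatBody (c :: cs') = false := by
          simp only [pvFloatBody, h]
          split
          · next heq => injection heq with h1 _; exact absurd h1 hdot
          · rfl
        rw [hA]
        unfold bBody
        by_cases hexp : c = 'e' ∨ c = 'E'
        · have htw0 : (c :: cs').takeWhile bNotExp = [] := by
            rw [List.takeWhile_cons, if_neg (by rcases hexp with rfl | rfl <;> decide)]
          rw [htw0]
          simp [bMant, bGroup]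
        · have hcne : bNotExp c = true := by
            simp only [bNotExp, Bool.and_eq_true, bne_iff_ne]
            exact ⟨fun hh => hexp (Or.inl hh), fun hh => hexp (Or.inr hh)⟩
          have htw0 : (c :: cs').takeWhile bNotExp = c :: cs'.takeWhile bNotExp := by
            rw [List.takeWhile_cons, if_pos hcne]
          rw [htw0, mant_reject0 _ hc (by simp [bNotDot, bne_iff_ne, hdot])]
          simp
  | some r =>
    obtain ⟨g, hgr, hg, hsr⟩ := digPart_decompose h
    subst hgr
    unfold bBody
    rw [group_tw_notexp hg, group_dw_notexp hg]
    rcases hr : r with _ | ⟨h0, r'⟩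
    · subst hr
      have hA : pvFloatBody (g ++ []) = true := by
        simp only [pvFloatBody, h]
        rfl
      rw [hA]
      simp only [List.takeWhile_nil, List.dropWhile_nil, List.append_nil]
      rw [mant_group hg]
      simp [bExp]
    · subst hr
      by_cases hdot : h0 = '.'
      · subst hdot
        have htw : ('.' :: r').takeWhile bNotExp = '.' :: r'.takeWhile bNotExp := by
          rw [List.takeWhile_cons, if_pos (by decide : bNotExp '.' = true)]
        have hdw : ('.' :: r').dropWhile bNotExp = r'.dropWhile bNotExp := by
          rw [List.dropWhile_cons, if_pos (by decide : bNotExp '.' = true)]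
        rw [htw, hdw, mant_gdot hg]
        cases h2 : pvDigPart? r' with
        | some r3 =>
          have hA : pvFloatBody (g ++ '.' :: r') = pvExpPart r3 := by
            simp only [pvFloatBody, h, h2]
          rw [hA]
          obtain ⟨g2, hces, hg2, hs3⟩ := digPart_decompose h2
          subst hces
          rw [group_tw_notexp hg2, group_dw_notexp hg2]
          rcases hr3 : r3 with _ | ⟨h1, r3'⟩
          · subst hr3
            simp only [List.takeWhile_nil, List.dropWhile_nil, List.append_nil]
            rw [hg2]
            simp [pvExpPart, bExp]
          · subst hr3
            by_cases hexp : h1 = 'e' ∨ h1 = 'E'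
            · have htw0 : (h1 :: r3').takeWhile bNotExp = [] := by
                rw [List.takeWhile_cons, if_neg (by rcases hexp with rfl | rfl <;> decide)]
              have hdw0 : (h1 :: r3').dropWhile bNotExp = h1 :: r3' := by
                rw [List.dropWhile_cons, if_neg (by rcases hexp with rfl | rfl <;> decide)]
              rw [htw0, hdw0, List.append_nil, hg2]
              rw [expPart_eq_bExp (Or.inr ⟨r3', by rcases hexp with rfl | rfl <;> simp⟩)]
              simp
            · have hcne : bNotExp h1 = true := by
                simp only [bNotExp, Bool.and_eq_true, bne_iff_ne]
                exact ⟨fun hh => hexp (Or.inl hh), fun hh => hexp (Or.inr hh)⟩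
              obtain ⟨hrej1, hrej2⟩ := group_tw_reject hg2 hs3 rfl hcne
              rw [expPart_false hexp, hrej1, hrej2]
              simp
        | none =>
          have hA : pvFloatBody (g ++ '.' :: r') = pvExpPart r' := by
            simp only [pvFloatBody, h, h2]
          rw [hA]
          have hsh : r' = [] ∨ ∃ c2 cs'', r' = c2 :: cs'' ∧ pvIsDig c2 = false := by
            cases r' with
            | nil => exact Or.inl rfl
            | cons c2 cs'' =>
              right
              refine ⟨c2, cs'', rfl, ?_⟩
              rw [digPart_cons] at h2
              by_cases hd : pvIsDig c2 = true
              · rw [if_pos hd] at h2; exact absurd h2 (by simp)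
              · simpa using hd
          rcases hsh with rfl | ⟨c2, cs'', rfl, hc2⟩
          · simp [pvExpPart, bExp]
          · by_cases hexp : c2 = 'e' ∨ c2 = 'E'
            · have htw0 : (c2 :: cs'').takeWhile bNotExp = [] := by
                rw [List.takeWhile_cons, if_neg (by rcases hexp with rfl | rfl <;> decide)]
              have hdw0 : (c2 :: cs'').dropWhile bNotExp = c2 :: cs'' := by
                rw [List.dropWhile_cons, if_neg (by rcases hexp with rfl | rfl <;> decide)]
              rw [htw0, hdw0]
              rw [expPart_eq_bExp (Or.inr ⟨cs'', by rcases hexp with rfl | rfl <;> simp⟩)]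
              simp
            · have hcne : bNotExp c2 = true := by
                simp only [bNotExp, Bool.and_eq_true, bne_iff_ne]
                exact ⟨fun hh => hexp (Or.inl hh), fun hh => hexp (Or.inr hh)⟩
              have htw0 : (c2 :: cs'').takeWhile bNotExp = c2 :: cs''.takeWhile bNotExp := by
                rw [List.takeWhile_cons, if_pos hcne]
              rw [htw0, expPart_false hexp]
              rw [show bGroup (c2 :: cs''.takeWhile bNotExp) = false by
                rw [bGroup_cons, hc2]; rfl]
              simp
      · -- r = h0 :: r' with h0 not a dot: A runs the exponent check directly
        have hA : pvFloatBody (g ++ h0 :: r') = pvExpPart (h0 :: r') := by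
          simp only [pvFloatBody, h]
          split
          · next heq => injection heq with h1 _; exact absurd h1 hdot
          · rfl
        rw [hA]
        have hnd : pvIsDig h0 = false := by
          rw [bStop_cons] at hsr
          simp only [Bool.and_eq_true, Bool.not_eq_eq_eq_not, Bool.not_true] at hsr
          exact hsr.1
        by_cases hexp : h0 = 'e' ∨ h0 = 'E'
        · have htw0 : (h0 :: r').takeWhile bNotExp = [] := by
            rw [List.takeWhile_cons, if_neg (by rcases hexp with rfl | rfl <;> decide)]
          have hdw0 : (h0 :: r').dropWhile bNotExp = h0 :: r' := by
            rw [List.dropWhile_cons, if_neg (by rcases hexp with rfl | rfl <;> decide)]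
          rw [htw0, hdw0, List.append_nil, mant_group hg]
          rw [expPart_eq_bExp (Or.inr ⟨r', by rcases hexp with rfl | rfl <;> simp⟩)]
          simp
        · have hcne : bNotExp h0 = true := by
            simp only [bNotExp, Bool.and_eq_true, bne_iff_ne]
            exact ⟨fun hh => hexp (Or.inl hh), fun hh => hexp (Or.inr hh)⟩
          rw [expPart_false hexp]
          have htw0 : (h0 :: r').takeWhile bNotExp = h0 :: r'.takeWhile bNotExp := by
            rw [List.takeWhile_cons, if_pos hcne]
          have hx : bStop (h0 :: r'.takeWhile bNotExp) = true := by
            rw [← htw0]; exact bStop_takeWhile bNotExp hsr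
          rw [htw0, mant_reject hg hx h0 _ rfl (by simp [bNotDot, bne_iff_ne, hdot])]
          simp

theorem floatOk_eq (l : List Char) : pvFloatOk l = bFloatOk l := by
  simp only [pvFloatOk, bFloatOk]
  rw [bSign_match (PySem.Chars.strip l)]
  set cs := bSign (PySem.Chars.strip l) with hcs
  by_cases h : PySem.Chars.lower cs = ['i','n','f'] ∨ PySem.Chars.lower cs = ['i','n','f','i','n','i','t','y'] ∨ PySem.Chars.lower cs = ['n','a','n']
  · rw [if_pos h]
    rcases h with h | h | h <;> simp [h]
  · rw [if_neg h]
    simp only [not_or] at h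
    obtain ⟨h1, h2, h3⟩ := h
    rw [body_eq]
    simp [h1, h2, h3]

theorem fmt_eq (p : String) : bFmt p = pvFmt p := by
  unfold bFmt pvFmt
  rw [floatOk_eq]

-- ---- Part 2: the surrounding program (split-and-join = cursor scan) ----

-- structural reference for split('?')
def pvSp : List Char → List (List Char)
  | [] => [[]]
  | c :: cs => if c = '?' then [] :: pvSp cs else (pvSp cs).modifyHead (c :: ·)

theorem pvSp_ne_nil (cs : List Char) : pvSp cs ≠ [] := by
  induction cs with
  | nil => simp [pvSp]
  | cons c cs ih =>
    simp only [pvSp]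
    split
    · simp
    · cases h : pvSp cs with
      | nil => exact absurd h ih
      | cons x xs => simp [List.modifyHead]

theorem pv_go_eq (fuel : Nat) : ∀ (l cur : List Char) (acc : List (List Char)),
    l.length ≤ fuel →
    PySem.Chars.splitOn.go ['?'] fuel l cur acc =
      acc.reverse ++ (pvSp l).modifyHead (cur.reverse ++ ·) := by
  induction fuel with
  | zero =>
    intro l cur acc h
    have hl : l = [] := List.eq_nil_of_length_eq_zero (Nat.le_zero.mp h)
    subst hl
    simp [PySem.Chars.splitOn.go, pvSp, List.modifyHead]
  | succ fuel ih =>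
    intro l cur acc h
    cases l with
    | nil => simp [PySem.Chars.splitOn.go, pvSp, List.modifyHead]
    | cons c rest =>
      simp only [PySem.Chars.splitOn.go]
      by_cases hc : c = '?'
      · subst hc
        have hpre : List.isPrefixOf ['?'] ('?' :: rest) = true := by
          simp [List.isPrefixOf]
        rw [if_pos hpre]
        have := ih rest [] (cur.reverse :: acc) (by simpa using Nat.le_of_succ_le_succ h)
        simp only [List.length_cons, List.length_nil, List.drop_succ_cons, List.drop_zero] at this ⊢
        rw [this]
        simp [pvSp, List.modifyHead]
        cases pvSp rest <;> rfl
      · have hpre : ¬ (List.isPrefixOf ['?'] (c :: rest) = true) := by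
          simp only [List.isPrefixOf, Bool.and_true, beq_iff_eq]
          exact fun h2 => hc h2.symm
        rw [if_neg hpre]
        rw [ih rest (c :: cur) acc (by simpa using Nat.le_of_succ_le_succ h)]
        simp only [pvSp, if_neg hc]
        rw [List.modifyHead_modifyHead]
        congr 1
        cases hsp : pvSp rest with
        | nil => exact absurd hsp (pvSp_ne_nil rest)
        | cons x xs => simp [List.modifyHead, List.append_assoc]

theorem pvSplitOn_eq (cs : List Char) :
    PySem.Chars.splitOn cs ['?'] = pvSp cs := by
  unfold PySem.Chars.splitOn
  rw [pv_go_eq (cs.length + 1) cs [] [] (Nat.le_succ _)]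
  simp only [List.reverse_nil, List.nil_append]
  cases pvSp cs <;> rfl

theorem pvSp_no_q {cs : List Char} (h : '?' ∉ cs) : pvSp cs = [cs] := by
  induction cs with
  | nil => rfl
  | cons c cs ih =>
    simp only [List.mem_cons, not_or] at h
    simp [pvSp, Ne.symm h.1, ih h.2, List.modifyHead]

theorem pvSp_append {pre : List Char} (post : List Char) (h : '?' ∉ pre) :
    pvSp (pre ++ '?' :: post) = pre :: pvSp post := by
  induction pre with
  | nil => simp [pvSp]
  | cons c pre ih =>
    simp only [List.mem_cons, not_or] at h
    simp [pvSp, Ne.symm h.1, ih h.2, List.modifyHead]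

theorem pvJoin_sp (cs : List Char) : PySem.Chars.join ['?'] (pvSp cs) = cs := by
  induction cs with
  | nil => rfl
  | cons c cs ih =>
    simp only [pvSp]
    split
    · rcases h : pvSp cs with _ | ⟨x, xs⟩
      · exact absurd h (pvSp_ne_nil cs)
      · rw [h] at ih
        rename_i hq
        subst hq
        cases xs <;> simp_all [PySem.Chars.join, List.intercalate]
    · rcases h : pvSp cs with _ | ⟨x, xs⟩
      · exact absurd h (pvSp_ne_nil cs)
      · rw [h] at ih
        simp only [List.modifyHead]
        cases xs <;> simp_all [PySem.Chars.join, List.intercalate]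

-- find.go characterised by index?
theorem pvFindGo_eq : ∀ (l : List Char) (k : Nat),
    PySem.Chars.find.go ['?'] l k =
      match PySem.List.index? l '?' with
      | some j => ((k + j : Nat) : Int)
      | none => -1 := by
  intro l
  induction l with
  | nil =>
    intro k
    simp [PySem.Chars.find.go, PySem.List.index?]
  | cons c rest ih =>
    intro k
    by_cases hc : c = '?'
    · subst hc
      rw [show PySem.List.index? ('?' :: rest) '?' = some 0 from
        PySem.List.index?_cons_self '?' rest]
      simp [PySem.Chars.find.go, List.isPrefixOf]
    · have h1 : PySem.List.index? (c :: rest) '?' = (PySem.List.index? rest '?').map (· + 1) :=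
        PySem.List.index?_cons_of_ne rest hc
      have hpre : ¬ (List.isPrefixOf ['?'] (c :: rest) = true) := by
        simp only [List.isPrefixOf, Bool.and_true, beq_iff_eq]
        exact fun h2 => hc h2.symm
      rw [show PySem.Chars.find.go ['?'] (c :: rest) k = PySem.Chars.find.go ['?'] rest (k + 1) by
        simp only [PySem.Chars.find.go]
        rw [if_neg hpre]]
      rw [ih (k + 1), h1]
      cases PySem.List.index? rest '?' with
      | none => rfl
      | some j =>
        simp only [Option.map_some]
        congr 1
        omega

-- A's loop re-based on the suffix
def pvS : List String → List Char → List Char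
  | [], rest => rest
  | p :: ps, rest =>
    match PySem.List.index? rest '?' with
    | none => rest
    | some j => rest.take j ++ pvFmt p ++ pvS ps (rest.drop (j + 1))

theorem pvALoop_eq (ps : List String) : ∀ (t : List Char) (n : Nat) (res : List Char),
    n ≤ t.length →
    pvALoop t ps (n : Int) res = res ++ pvS ps (t.drop n) := by
  induction ps with
  | nil =>
    intro t n res hn
    simp [pvALoop, pvS, PySem.List.slice_from t (by positivity : (0:Int) ≤ (n:Int))]
  | cons p ps ih =>
    intro t n res hn
    simp only [pvALoop, pvS]
    rw [PySem.Chars.findFrom_natCast t ['?'] n hn]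
    unfold PySem.Chars.find
    rw [pvFindGo_eq (t.drop n) 0]
    cases hidx : PySem.List.index? (t.drop n) '?' with
    | none =>
      simp [PySem.List.slice_from t (by positivity : (0:Int) ≤ (n:Int))]
    | some j =>
      obtain ⟨pre, suf, hdec, hlen, hmem⟩ := (PySem.List.index?_eq_some_iff _ _ _).mp hidx
      simp only [Nat.zero_add]
      rw [if_neg (show ¬(((j : Nat) : Int) = -1) by omega)]
      rw [if_neg (show ¬(((n : Nat) : Int) + ((j : Nat) : Int) = -1) by omega)]
      have hlen2 : n + j + 1 ≤ t.length := by
        have : (t.drop n).length = t.length - n := List.length_drop ..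
        have : j < (t.drop n).length := by
          rw [hdec]
          simp [hlen]
        omega
      have hcast : ((n : Int) + (j : Int) + 1) = (((n + j + 1 : Nat)) : Int) := by push_cast; ring
      rw [hcast, ih t (n + j + 1) _ hlen2]
      have hdrop : t.drop (n + j + 1) = (t.drop n).drop (j + 1) := by
        rw [List.drop_drop]
        ring_nf
      have hslice : PySem.List.slice t (some (n : Int)) (some ((n : Int) + (j : Int))) = pre := by
        have h0 : (0:Int) ≤ (n:Int) := by positivity
        have h1 : (0:Int) ≤ (n:Int) + (j:Int) := by positivity
        rw [show ((n:Int) + (j:Int)) = (((n + j : Nat)) : Int) by push_cast; ring]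
        rw [PySem.List.slice_toNat t (by positivity) (by positivity)]
        simp only [Int.toNat_natCast]
        rw [show n + j - n = j from by omega, hdec, List.take_left' hlen]
      have hdrop2 : (t.drop n).drop (j + 1) = suf := by
        rw [hdec, show pre ++ '?' :: suf = (pre ++ ['?']) ++ suf from by simp]
        exact List.drop_left' (by simp [hlen])
      rw [hslice, hdrop, hdrop2, hdec, List.take_left' hlen]
      simp

-- B's body on parts/params
def pvB (parts : List (List Char)) (ps : List String) : List Char :=
  let k := min ps.length (parts.length - 1)
  (((List.range k).map (fun i => parts.getD i [] ++ pvFmt (ps.getD i ""))).flatten) ++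
    PySem.Chars.join ['?'] (parts.drop k)

theorem pvS_eq_pvB (ps : List String) : ∀ (rest : List Char),
    pvS ps rest = pvB (pvSp rest) ps := by
  induction ps with
  | nil =>
    intro rest
    simp [pvS, pvB, pvJoin_sp]
  | cons p ps ih =>
    intro rest
    cases hidx : PySem.List.index? rest '?' with
    | none =>
      have hq : '?' ∉ rest := (PySem.List.index?_eq_none_iff _ _).mp hidx
      simp only [pvS, hidx]
      rw [pvSp_no_q hq]
      simp [pvB, PySem.Chars.join, List.intercalate]
    | some j =>
      obtain ⟨pre, suf, hdec, hlen, hmem⟩ := (PySem.List.index?_eq_some_iff _ _ _).mp hidx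
      subst hdec
      simp only [pvS, hidx]
      rw [pvSp_append suf hmem, List.take_left' hlen]
      have hdropr : (pre ++ '?' :: suf).drop (j + 1) = suf := by
        rw [show pre ++ '?' :: suf = (pre ++ ['?']) ++ suf from by simp]
        exact List.drop_left' (by simp [hlen])
      rw [hdropr, ih suf]
      rcases hsp : pvSp suf with _ | ⟨x, xs⟩
      · exact absurd hsp (pvSp_ne_nil suf)
      · simp only [pvB, List.length_cons, Nat.add_sub_cancel, Nat.succ_min_succ,
          List.range_succ_eq_map, List.map_cons, List.map_map, List.flatten_cons,
          List.getD_cons_zero, List.drop_succ_cons]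
        simp [Function.comp_def, List.append_assoc]

-- ===== VERDICT (by name: the statement is the Claim_ definition above) =====
theorem remplacer_parametres_spec : Claim_equal_remplacer_parametres := by
  intro texte parametres _
  unfold Spec_remplacer_parametres remplacer_parametres remplacer_parametres_alt
  simp only [fmt_eq]
  rw [show (0 : Int) = ((0 : Nat) : Int) from rfl,
      pvALoop_eq parametres texte.toList 0 [] (Nat.zero_le _)]
  simp only [List.drop_zero, List.nil_append, pvSplitOn_eq]
  rw [pvS_eq_pvB]
  rfl
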